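-- pv_equiv track=rewrite | github.com/SurrealEverything/Lesk-Algorithm | lesk.py | extended_lesk_measure
-- ===== SOURCE A (Python) =====
-- def extended_lesk_measure(gloss1, gloss2):
--
--     score = 0
--     gloss1 = gloss1.copy()
--     gloss2 = gloss2.copy()
--     removing = True
--
--     while removing:
--
--         removing = False
--
--         for subset_len in reversed(range(1, len(gloss1) + 1)):
--
--             for left_offset in range(len(gloss1) + 1 - subset_len):
--
--                 left = gloss1[left_offset:left_offset + subset_len]
--
--                 for right_offset in range(len(gloss2) + 1 - subset_len):
--
--                     right = gloss2[right_offset:right_offset + subset_len]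
--
--                     if left == right and '*' not in left and '*' not in right:
--
--                         score += subset_len * subset_len
--                         gloss1[left_offset:left_offset + subset_len] = ['*']
--                         gloss2[right_offset:right_offset + subset_len] = ['*']
--                         removing = True
--                         break
--
--     return score
-- ===== SOURCE B (Python) =====
-- def extended_lesk_measure(gloss1, gloss2):
--     score = 0
--     g1 = list(gloss1)
--     g2 = list(gloss2)
--     removing = True
--     while removing:
--         removing = False
--         for j in reversed(range(1, len(g1) + 1)):
--             index = None
--             lo = 0
--             while lo + j <= len(g1):
--                 if index is None:
--                     # hash index of gloss2's '*'-free length-j segments -> first offset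
--                     index = {}
--                     for ro in range(len(g2) + 1 - j):
--                         seg = tuple(g2[ro:ro + j])
--                         if '*' not in seg:
--                             index.setdefault(seg, ro)
--                 left = tuple(g1[lo:lo + j])
--                 ro = None if '*' in left else index.get(left)
--                 if ro is not None:
--                     score += j * j
--                     g1[lo:lo + j] = ['*']
--                     g2[ro:ro + j] = ['*']
--                     removing = True
--                     index = None
--                 lo += 1
--     return score
-- ===== Notes on version B (the rewrite author's own statement) =====
-- stated objective: faster
-- what changed: B replaces A's innermost scan over all gloss2 offsets (slice comparison per offset) by a hash index mapping each '*'-free length-j segment of gloss2 to its first offset, built once per segment length and rebuilt only after a removal, and it bounds the offset loop by the current (not stale) list length.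
import Mathlib
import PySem

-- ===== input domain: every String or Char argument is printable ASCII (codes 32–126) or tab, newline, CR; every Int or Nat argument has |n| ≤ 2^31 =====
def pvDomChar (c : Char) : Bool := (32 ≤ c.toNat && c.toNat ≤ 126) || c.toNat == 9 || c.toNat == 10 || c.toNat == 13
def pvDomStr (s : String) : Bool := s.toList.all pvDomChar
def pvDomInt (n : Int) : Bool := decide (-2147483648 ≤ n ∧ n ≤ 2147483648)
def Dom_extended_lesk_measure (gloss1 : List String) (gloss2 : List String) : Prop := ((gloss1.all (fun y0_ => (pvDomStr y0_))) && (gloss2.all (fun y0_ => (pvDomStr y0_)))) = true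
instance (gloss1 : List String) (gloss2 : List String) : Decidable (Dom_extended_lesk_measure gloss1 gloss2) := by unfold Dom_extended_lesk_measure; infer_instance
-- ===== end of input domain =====

-- B replaces A's innermost scan over gloss2's offsets by a hash index of gloss2's '*'-free
-- length-j segments (objective: faster). Neither program mutates its arguments (A copies them).

-- ===== PORT A =====
-- Python's slice assignment `g[i:i+j] = ['*']` for 0 ≤ i, 1 ≤ j (the only arguments either port passes).
def pyReplaceSeg (g : List String) (i j : Int) : List String :=
  g.take i.toNat ++ ["*"] ++ g.drop (i + j).toNat

-- `for right_offset in range(...): right = gloss2[...]; if ...: <mutate, score, removing=True> break`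
def loopRoA (ros : List Int) (j lo : Int) (left : List String)
    (g1 g2 : List String) (score : Int) (rem : Bool) :
    List String × List String × Int × Bool :=
  match ros with
  | [] => (g1, g2, score, rem)
  | ro :: rest =>
    let right := PySem.List.slice g2 (some ro) (some (ro + j))
    if left = right ∧ "*" ∉ left ∧ "*" ∉ right then
      (pyReplaceSeg g1 lo j, pyReplaceSeg g2 ro j, score + j * j, true)
    else
      loopRoA rest j lo left g1 g2 score rem

-- `for left_offset in range(len(gloss1) + 1 - subset_len): ...` (the range list is fixed at loop entry,
-- exactly as Python fixes it, even though gloss1 may shrink during the loop)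
def loopLoA (los : List Int) (j : Int)
    (st : List String × List String × Int × Bool) :
    List String × List String × Int × Bool :=
  match los with
  | [] => st
  | lo :: rest =>
    match st with
    | (g1, g2, score, rem) =>
      let left := PySem.List.slice g1 (some lo) (some (lo + j))
      loopLoA rest j
        (loopRoA (PySem.List.pyRange 0 (PySem.List.len g2 + 1 - j) 1) j lo left g1 g2 score rem)

-- `for subset_len in reversed(range(1, len(gloss1) + 1)): ...`
def loopJA (js : List Int) (st : List String × List String × Int × Bool) :
    List String × List String × Int × Bool :=
  match js with
  | [] => st
  | j :: rest =>
    loopJA rest (loopLoA (PySem.List.pyRange 0 (PySem.List.len st.1 + 1 - j) 1) j st)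

-- one iteration of the while body: `removing = False; for subset_len in reversed(range(1, len(gloss1)+1)): ...`
def passA (g1 g2 : List String) (score : Int) :
    List String × List String × Int × Bool :=
  loopJA ((PySem.List.pyRange 1 (PySem.List.len g1 + 1) 1).reverse) (g1, g2, score, false)

-- `while removing:` — fuel only makes the recursion structural: every pass that sets `removing`
-- performs a removal, which deletes at least one non-'*' word from gloss1, so the loop body runs
-- at most len(gloss1)+1 times and the fuel below is never exhausted.
def whileA : Nat → List String × List String × Int → Int
  | 0, (_, _, score) => score
  | fuel + 1, (g1, g2, score) =>
    let r := passA g1 g2 score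
    if r.2.2.2 = true then whileA fuel (r.1, r.2.1, r.2.2.1) else r.2.2.1

def extended_lesk_measure (gloss1 : List String) (gloss2 : List String) : Int :=
  whileA (gloss1.length + 2) (gloss1, gloss2, 0)

-- ===== PORT B =====
-- `for ro in range(len(g2) + 1 - j): seg = tuple(g2[ro:ro+j]); if '*' not in seg: index.setdefault(seg, ro)`
def buildIdxB (ros : List Int) (j : Int) (g2 : List String)
    (d : PySem.Dict (List String) Int) : PySem.Dict (List String) Int :=
  match ros with
  | [] => d
  | ro :: rest =>
    let seg := PySem.List.slice g2 (some ro) (some (ro + j))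
    buildIdxB rest j g2 (if "*" ∈ seg then d else d.setdefault seg ro)

-- `while lo + j <= len(g1): ...` — the index is built lazily (idx = none) and invalidated on removal;
-- fuel only makes the recursion structural: lo grows and len(g1) never grows, so the guard fails
-- within the fuel supplied by loopJB.
def loopLoB (fuel : Nat) (lo j : Int) (g1 g2 : List String) (score : Int) (rem : Bool)
    (idx : Option (PySem.Dict (List String) Int)) :
    List String × List String × Int × Bool :=
  match fuel with
  | 0 => (g1, g2, score, rem)
  | f + 1 =>
    if lo + j ≤ PySem.List.len g1 then
      let d := match idx with
        | some d => d
        | none => buildIdxB (PySem.List.pyRange 0 (PySem.List.len g2 + 1 - j) 1) j g2 PySem.Dict.empty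
      let left := PySem.List.slice g1 (some lo) (some (lo + j))
      match (if "*" ∈ left then none else d.get? left) with
      | some ro =>
        loopLoB f (lo + 1) j (pyReplaceSeg g1 lo j) (pyReplaceSeg g2 ro j) (score + j * j) true none
      | none => loopLoB f (lo + 1) j g1 g2 score rem (some d)
    else (g1, g2, score, rem)

def loopJB (js : List Int) (st : List String × List String × Int × Bool) :
    List String × List String × Int × Bool :=
  match js with
  | [] => st
  | j :: rest =>
    match st with
    | (g1, g2, score, rem) => loopJB rest (loopLoB (g1.length + 1) 0 j g1 g2 score rem none)

def passB (g1 g2 : List String) (score : Int) :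
    List String × List String × Int × Bool :=
  loopJB ((PySem.List.pyRange 1 (PySem.List.len g1 + 1) 1).reverse) (g1, g2, score, false)

def whileB : Nat → List String × List String × Int → Int
  | 0, (_, _, score) => score
  | fuel + 1, (g1, g2, score) =>
    let r := passB g1 g2 score
    if r.2.2.2 = true then whileB fuel (r.1, r.2.1, r.2.2.1) else r.2.2.1

def extended_lesk_measure_alt (gloss1 : List String) (gloss2 : List String) : Int :=
  whileB (gloss1.length + 2) (gloss1, gloss2, 0)

-- ===== PRECONDITION & SPEC =====
def Spec_extended_lesk_measure (gloss1 : List String) (gloss2 : List String) (out : Int) : Prop := out = extended_lesk_measure_alt gloss1 gloss2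
instance (gloss1 : List String) (gloss2 : List String) (out : Int) : Decidable (Spec_extended_lesk_measure gloss1 gloss2 out) := by unfold Spec_extended_lesk_measure; infer_instance

-- ===== CLAIM (what is proved, stated in full; the proofs are below) =====
def Claim_equal_extended_lesk_measure : Prop := ∀ (gloss1 : List String) (gloss2 : List String), Dom_extended_lesk_measure gloss1 gloss2 → Spec_extended_lesk_measure gloss1 gloss2 (extended_lesk_measure gloss1 gloss2)

-- ===== LEMMAS AND PROOFS =====

-- length of a slice g[lo:lo+j] for 0 ≤ lo, 0 ≤ j
theorem lesk_slice_length (g : List String) (lo j : Int) (h0 : 0 ≤ lo) (hj : 0 ≤ j) :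
    (PySem.List.slice g (some lo) (some (lo + j))).length = min j.toNat (g.length - lo.toNat) := by
  rw [PySem.List.slice_toNat g h0 (by omega)]
  simp
  omega

-- once a key is bound, buildIdxB never rebinds it (setdefault never overwrites)
theorem buildIdxB_preserves (ros : List Int) (j : Int) (g2 : List String)
    (d : PySem.Dict (List String) Int) (k : List String) (v : Int)
    (hd : d.get? k = some v) : (buildIdxB ros j g2 d).get? k = some v := by
  induction ros generalizing d with
  | nil => simpa [buildIdxB] using hd
  | cons ro rest ih =>
    simp only [buildIdxB]
    apply ih
    split
    · exact hd
    · by_cases hk : k = PySem.List.slice g2 (some ro) (some (ro + j))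
      · subst hk
        rw [PySem.Dict.get?_setdefault_self]
        simp [hd]
      · rw [PySem.Dict.get?_setdefault_of_ne _ _ hk]
        exact hd

-- A's inner offset scan computes exactly the lookup in B's hash index
theorem loopRoA_eq_lookup (ros : List Int) (j lo : Int) (left : List String)
    (hstar : "*" ∉ left)
    (g1 g2 : List String) (score : Int) (rem : Bool)
    (d : PySem.Dict (List String) Int) (hd : d.get? left = none) :
    loopRoA ros j lo left g1 g2 score rem =
      match (buildIdxB ros j g2 d).get? left with
      | some ro => (pyReplaceSeg g1 lo j, pyReplaceSeg g2 ro j, score + j * j, true)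
      | none => (g1, g2, score, rem) := by
  induction ros generalizing d with
  | nil => simp [loopRoA, buildIdxB, hd]
  | cons ro rest ih =>
    simp only [loopRoA, buildIdxB]
    by_cases hseg : left = PySem.List.slice g2 (some ro) (some (ro + j))
    · rw [if_pos ⟨hseg, hstar, hseg ▸ hstar⟩]
      have hc : (buildIdxB rest j g2
          (if "*" ∈ PySem.List.slice g2 (some ro) (some (ro + j)) then d
           else d.setdefault (PySem.List.slice g2 (some ro) (some (ro + j))) ro)).get? left = some ro := by
        rw [if_neg (hseg ▸ hstar)]
        apply buildIdxB_preserves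
        rw [← hseg, PySem.Dict.get?_setdefault_self]
        simp [hd]
      rw [hc]
    · rw [if_neg (by intro h; exact hseg h.1)]
      apply ih
      split
      · exact hd
      · rw [PySem.Dict.get?_setdefault_of_ne _ _ hseg]
        exact hd

-- if '*' ∈ left the scan never fires
theorem loopRoA_star (ros : List Int) (j lo : Int) (left : List String)
    (hstar : "*" ∈ left) (g1 g2 : List String) (score : Int) (rem : Bool) :
    loopRoA ros j lo left g1 g2 score rem = (g1, g2, score, rem) := by
  induction ros with
  | nil => simp [loopRoA]
  | cons ro rest ih =>
    simp only [loopRoA]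
    rw [if_neg (by intro h; exact h.2.1 hstar)]
    exact ih

-- if left's length differs from every right's length, the scan never fires
theorem loopRoA_no_match (ros : List Int) (j lo : Int) (left : List String)
    (g1 g2 : List String) (score : Int) (rem : Bool)
    (h : ∀ ro ∈ ros, (PySem.List.slice g2 (some ro) (some (ro + j))).length ≠ left.length) :
    loopRoA ros j lo left g1 g2 score rem = (g1, g2, score, rem) := by
  induction ros with
  | nil => simp [loopRoA]
  | cons ro rest ih =>
    simp only [loopRoA]
    rw [if_neg (by
      intro hcond
      exact h ro (by simp) (by rw [← hcond.1]))]
    exact ih fun r hr => h r (by simp [hr])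

-- once the (stale) left offset is past the current end of gloss1, A's remaining scan is a no-op
theorem loopLoA_stale (n : Nat) : ∀ (lo L j : Int) (g1 g2 : List String) (score : Int) (rem : Bool),
    1 ≤ j → 0 ≤ lo → (L - lo).toNat = n → PySem.List.len g1 < lo + j →
    loopLoA (PySem.List.pyRange lo L 1) j (g1, g2, score, rem) = (g1, g2, score, rem) := by
  induction n with
  | zero =>
    intro lo L j g1 g2 score rem hj h0 hn hlt
    rw [PySem.List.pyRange_one_eq_nil (by omega)]
    rfl
  | succ m ih =>
    intro lo L j g1 g2 score rem hj h0 hn hlt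
    rw [PySem.List.pyRange_one_cons (by omega)]
    simp only [loopLoA]
    rw [loopRoA_no_match]
    · exact ih (lo + 1) L j g1 g2 score rem hj (by omega) (by omega) (by omega)
    · intro ro hro
      have hmem := (PySem.List.mem_pyRange_one).1 hro
      rw [lesk_slice_length g2 ro j hmem.1 (by omega),
          lesk_slice_length g1 lo j h0 (by omega)]
      simp only [PySem.List.len_eq] at hlt hmem
      omega

-- gloss1 can only shrink when a matched segment is replaced by '*'
theorem length_replace_le (g : List String) (lo j : Int) (h0 : 0 ≤ lo) (hj : 1 ≤ j)
    (hin : lo + j ≤ (g.length : Int)) : (pyReplaceSeg g lo j).length ≤ g.length := by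
  simp [pyReplaceSeg]
  omega

-- the key simulation: A's stale-range offset loop = B's index-backed while loop
theorem inner_eq (n : Nat) : ∀ (lo L j : Int) (g1 g2 : List String) (score : Int) (rem : Bool)
    (idx : Option (PySem.Dict (List String) Int)) (fuel : Nat),
    1 ≤ j → 0 ≤ lo → (L - lo).toNat = n → PySem.List.len g1 + 1 - j ≤ L →
    PySem.List.len g1 + 1 - j - lo ≤ (fuel : Int) →
    (idx = none ∨ idx = some (buildIdxB (PySem.List.pyRange 0 (PySem.List.len g2 + 1 - j) 1) j g2 PySem.Dict.empty)) →
    loopLoA (PySem.List.pyRange lo L 1) j (g1, g2, score, rem) = loopLoB fuel lo j g1 g2 score rem idx := by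
  induction n with
  | zero =>
    intro lo L j g1 g2 score rem idx fuel hj h0 hn hL hfuel hidx
    rw [PySem.List.pyRange_one_eq_nil (by omega)]
    have hgt : ¬ (lo + j ≤ PySem.List.len g1) := by
      simp only [PySem.List.len_eq] at hL ⊢; omega
    cases fuel with
    | zero => rfl
    | succ f => simp only [loopLoA, loopLoB]; rw [if_neg hgt]
  | succ m ih =>
    intro lo L j g1 g2 score rem idx fuel hj h0 hn hL hfuel hidx
    by_cases hin : lo + j ≤ PySem.List.len g1
    · -- left slice is full length: one genuine step on both sides
      have hfuelpos : fuel ≠ 0 := by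
        intro h; subst h
        simp only [PySem.List.len_eq, Nat.cast_zero] at hfuel hin
        omega
      obtain ⟨f, rfl⟩ := Nat.exists_eq_succ_of_ne_zero hfuelpos
      have hloL : lo < L := by simp only [PySem.List.len_eq] at hL hin; omega
      rw [PySem.List.pyRange_one_cons hloL]
      have hBstep : loopLoB (f + 1) lo j g1 g2 score rem idx =
          (match (if "*" ∈ PySem.List.slice g1 (some lo) (some (lo + j)) then none
                  else ((buildIdxB (PySem.List.pyRange 0 (PySem.List.len g2 + 1 - j) 1) j g2
                    PySem.Dict.empty).get? (PySem.List.slice g1 (some lo) (some (lo + j))))) with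
           | some ro => loopLoB f (lo + 1) j (pyReplaceSeg g1 lo j) (pyReplaceSeg g2 ro j)
               (score + j * j) true none
           | none => loopLoB f (lo + 1) j g1 g2 score rem
               (some (buildIdxB (PySem.List.pyRange 0 (PySem.List.len g2 + 1 - j) 1) j g2
                 PySem.Dict.empty))) := by
        rcases hidx with rfl | rfl <;> simp only [loopLoB, if_pos hin]
      rw [hBstep]
      simp only [loopLoA]
      by_cases hst : "*" ∈ PySem.List.slice g1 (some lo) (some (lo + j))
      · rw [loopRoA_star _ _ _ _ hst]
        rw [if_pos hst]
        exact ih (lo + 1) L j g1 g2 score rem _ f hj (by omega) (by omega) hL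
          (by push_cast at hfuel ⊢; omega) (Or.inr rfl)
      · rw [loopRoA_eq_lookup _ _ _ _ hst _ _ _ _ PySem.Dict.empty (by simp [PySem.Dict.get?_empty])]
        rw [if_neg hst]
        cases hD : (buildIdxB (PySem.List.pyRange 0 (PySem.List.len g2 + 1 - j) 1) j g2
            PySem.Dict.empty).get? (PySem.List.slice g1 (some lo) (some (lo + j))) with
        | none =>
          exact ih (lo + 1) L j g1 g2 score rem _ f hj (by omega) (by omega) hL
            (by push_cast at hfuel ⊢; omega) (Or.inr rfl)
        | some ro =>
          have hlen : ((pyReplaceSeg g1 lo j).length : Int) ≤ (g1.length : Int) := by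
            exact_mod_cast Nat.cast_le.2 (length_replace_le g1 lo j h0 hj
              (by simpa [PySem.List.len_eq] using hin))
          apply ih (lo + 1) L j _ _ _ _ _ f hj (by omega) (by omega)
          · simp only [PySem.List.len_eq] at hL ⊢; omega
          · simp only [PySem.List.len_eq] at hfuel ⊢; push_cast at hfuel ⊢; omega
          · exact Or.inl rfl
    · -- stale tail: A's remaining scan is a no-op, B's guard fails
      rw [loopLoA_stale (L - lo).toNat lo L j g1 g2 score rem hj h0 rfl (by omega)]
      cases fuel with
      | zero => rfl
      | succ f => simp only [loopLoB]; rw [if_neg hin]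

theorem loopJ_eq (js : List Int) : ∀ (st : List String × List String × Int × Bool),
    (∀ j ∈ js, 1 ≤ j) → loopJA js st = loopJB js st := by
  induction js with
  | nil => intro st _; rfl
  | cons j rest ih =>
    intro st h
    obtain ⟨g1, g2, score, rem⟩ := st
    simp only [loopJA, loopJB]
    rw [inner_eq (PySem.List.len g1 + 1 - j - 0).toNat 0 (PySem.List.len g1 + 1 - j) j g1 g2
      score rem none (g1.length + 1) (h j (by simp)) le_rfl rfl le_rfl
      (by simp only [PySem.List.len_eq]; push_cast; have := h j (by simp); omega) (Or.inl rfl)]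
    exact ih _ (fun i hi => h i (by simp [hi]))

theorem pass_eq (g1 g2 : List String) (score : Int) : passA g1 g2 score = passB g1 g2 score := by
  unfold passA passB
  apply loopJ_eq
  intro j hj
  rw [List.mem_reverse, PySem.List.mem_pyRange_one] at hj
  exact hj.1

theorem while_eq (fuel : Nat) : ∀ t, whileA fuel t = whileB fuel t := by
  induction fuel with
  | zero => intro t; obtain ⟨g1, g2, score⟩ := t; rfl
  | succ f ih =>
    intro t
    obtain ⟨g1, g2, score⟩ := t
    simp only [whileA, whileB, pass_eq]
    split
    · exact ih _
    · rfl

-- ===== VERDICT (by name: the statement is the Claim_ definition above) =====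
theorem extended_lesk_measure_spec : Claim_equal_extended_lesk_measure := by
  intro g1 g2 _
  unfold Spec_extended_lesk_measure extended_lesk_measure extended_lesk_measure_alt
  exact while_eq _ _
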